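-- pv_equiv track=rewrite | github.com/TAE-SEOP/Algorithm | 파이썬/완전탐색_모의고사.py | solution
-- ===== SOURCE A (Python) =====
-- def solution(answers):
--     answer = []
--     first = [1,2,3,4,5]
--     second = [2,1,2,3,2,4,2,5]
--     third = [3,3,1,1,2,2,4,4,5,5]
--     check = [0,0,0]
--
--     for i,a in enumerate(answers):
--         if first[i % 5] == a:
--             check[0] += 1
--         if second[i % 8] == a:
--             check[1] += 1
--         if third[i % 10] == a:
--             check[2] += 1
--
--     for i,c in enumerate(check):
--          if c == max(check):
--              answer.append(i+1)
--
--     return answer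
-- ===== SOURCE B (Python) =====
-- def solution(answers):
--     # 40 = lcm(5, 8, 10): all three patterns repeat with period 40, so a single
--     # histogram of (index mod 40, answer) pairs determines every score.
--     cnt = {}
--     for i, a in enumerate(answers):
--         k = (i % 40, a)
--         cnt[k] = cnt.get(k, 0) + 1
--     patterns = [[1, 2, 3, 4, 5],
--                 [2, 1, 2, 3, 2, 4, 2, 5],
--                 [3, 3, 1, 1, 2, 2, 4, 4, 5, 5]]
--     scores = [sum(cnt.get((r, pat[r % len(pat)]), 0) for r in range(40))
--               for pat in patterns]
--     best = max(scores)
--     return [i + 1 for i, s in enumerate(scores) if s == best]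
-- ===== Notes on version B (the rewrite author's own statement) =====
-- stated objective: alternative
-- what changed: A compares every answer against all three cyclic patterns in one fused loop; B first builds a histogram keyed by (index mod 40, answer) in a single pass (40 = lcm of the pattern periods 5, 8, 10), then scores each pattern by 40 table lookups without re-reading the answers, and finally selects the argmax indices.
import Mathlib
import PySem

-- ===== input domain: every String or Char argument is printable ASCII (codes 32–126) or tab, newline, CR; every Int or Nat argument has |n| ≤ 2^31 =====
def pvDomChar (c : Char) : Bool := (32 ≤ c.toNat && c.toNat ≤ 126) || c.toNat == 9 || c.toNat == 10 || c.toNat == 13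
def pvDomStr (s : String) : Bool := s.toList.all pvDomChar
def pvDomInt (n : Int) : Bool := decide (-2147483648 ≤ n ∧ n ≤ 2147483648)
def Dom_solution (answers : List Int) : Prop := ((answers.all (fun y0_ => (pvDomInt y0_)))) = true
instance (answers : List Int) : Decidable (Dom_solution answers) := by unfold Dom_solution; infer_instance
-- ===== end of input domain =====

-- B builds a histogram keyed by (index mod 40, answer) once (40 = lcm of the three
-- pattern periods) and scores each pattern from the table; return value only.

-- ===== PORT A =====
-- the single for-loop of A: enumerate index carried as a Nat counter, the three counters as a triple
def loopA : List Int → Nat → (Int × Int × Int) → (Int × Int × Int)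
  | [], _, c => c
  | a :: rest, i, (c0, c1, c2) =>
      loopA rest (i + 1)
        (c0 + (if ([1, 2, 3, 4, 5] : List Int).getD (i % 5) 0 = a then 1 else 0),
         c1 + (if ([2, 1, 2, 3, 2, 4, 2, 5] : List Int).getD (i % 8) 0 = a then 1 else 0),
         c2 + (if ([3, 3, 1, 1, 2, 2, 4, 4, 5, 5] : List Int).getD (i % 10) 0 = a then 1 else 0))

def solution (answers : List Int) : List Int :=
  let c := loopA answers 0 (0, 0, 0)
  -- second loop unrolled over the 3-element check list; max(check) = max(max(c0,c1),c2)
  let m := max (max c.1 c.2.1) c.2.2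
  (if c.1 = m then [(1 : Int)] else []) ++
  (if c.2.1 = m then [(2 : Int)] else []) ++
  (if c.2.2 = m then [(3 : Int)] else [])

-- ===== PORT B =====
-- the histogram loop: cnt[(i % 40, a)] = cnt.get((i % 40, a), 0) + 1
def buildCnt : List Int → Nat → PySem.Dict (Int × Int) Int → PySem.Dict (Int × Int) Int
  | [], _, d => d
  | a :: rest, i, d =>
      buildCnt rest (i + 1)
        (d.insert (((i % 40 : Nat) : Int), a) (d.getD (((i % 40 : Nat) : Int), a) 0 + 1))

-- sum(cnt.get((r, pat[r % len(pat)]), 0) for r in range(40))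
def scoreC (cnt : PySem.Dict (Int × Int) Int) (pat : List Int) : Int :=
  ((PySem.List.pyRange 0 40 1).map
    (fun r => cnt.getD (r, PySem.List.pyGetD pat (PySem.Int.mod r (pat.length : Int)) 0) 0)).sum

def solution_alt (answers : List Int) : List Int :=
  let cnt := buildCnt answers 0 PySem.Dict.empty
  let patterns : List (List Int) :=
    [[1, 2, 3, 4, 5], [2, 1, 2, 3, 2, 4, 2, 5], [3, 3, 1, 1, 2, 2, 4, 4, 5, 5]]
  let scores := patterns.map (fun pat => scoreC cnt pat)
  let best := (PySem.List.max? scores (fun x => x)).getD 0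
  ((PySem.List.enumerate scores).filter (fun p => p.2 = best)).map (fun p => p.1 + 1)

-- ===== PRECONDITION & SPEC =====
def Spec_solution (answers : List Int) (out : List Int) : Prop := out = solution_alt answers
instance (answers : List Int) (out : List Int) : Decidable (Spec_solution answers out) := by unfold Spec_solution; infer_instance

-- ===== CLAIM (what is proved, stated in full; the proofs are below) =====
def Claim_equal_solution : Prop := ∀ (answers : List Int), Dom_solution answers → Spec_solution answers (solution answers)

-- ===== LEMMAS AND PROOFS =====

def scoreB (pat : List Int) : List Int → Nat → Int → Int
  | [], _, s => s
  | a :: rest, i, s =>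
      scoreB pat rest (i + 1) (s + (if a = pat.getD (i % pat.length) 0 then 1 else 0))

theorem scoreB_acc (pat : List Int) (l : List Int) (i : Nat) (s : Int) :
    scoreB pat l i s = s + scoreB pat l i 0 := by
  induction l generalizing i s with
  | nil => simp [scoreB]
  | cons a rest ih =>
    simp only [scoreB]
    rw [ih, ih (s := 0 + _)]
    ring

def keysOf : List Int → Nat → List (Int × Int)
  | [], _ => []
  | a :: t, i => (((i % 40 : Nat) : Int), a) :: keysOf t (i + 1)

def cntM (v : Nat → Int) : List Int → Nat → Int
  | [], _ => 0
  | a :: t, i => (if a = v (i % 40) then 1 else 0) + cntM v t (i + 1)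

theorem sum_ite_range (n m : Nat) (c : Int) (hm : m < n) :
    ((List.range n).map (fun k => if k = m then c else 0)).sum = c := by
  induction n with
  | zero => omega
  | succ n ih =>
    rw [List.range_succ, List.map_append, List.sum_append]
    rcases Nat.lt_succ_iff_lt_or_eq.mp hm with h | h
    · rw [ih h]; simp; omega
    · subst h
      have : ((List.range m).map (fun k => if k = m then c else 0)).sum = 0 := by
        rw [List.sum_eq_zero]; intro x hx
        simp only [List.mem_map, List.mem_range] at hx
        obtain ⟨k, hk, rfl⟩ := hx
        simp [Nat.ne_of_lt hk]
      simp [this]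

theorem sumCount (v : Nat → Int) (l : List Int) (i : Nat) :
    ((List.range 40).map
        (fun k : Nat => (((keysOf l i).count (((k : Nat) : Int), v k)) : Int))).sum
      = cntM v l i := by
  induction l generalizing i with
  | nil => simp [keysOf, cntM]
  | cons a t ih =>
    simp only [keysOf, cntM]
    have step : ∀ k : Nat,
        ((((((i % 40 : Nat) : Int), a) :: keysOf t (i + 1)).count (((k : Nat) : Int), v k)) : Int)
          = (((keysOf t (i + 1)).count (((k : Nat) : Int), v k)) : Int)
            + (if k = i % 40 then (if a = v (i % 40) then (1 : Int) else 0) else 0) := by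
      intro k
      rw [List.count_cons]
      by_cases hk : k = i % 40
      · subst hk
        by_cases ha : a = v (i % 40)
        · simp [ha]
        · have hne : (((((i % 40 : Nat) : Int), a)) == ((((i % 40 : Nat) : Int), v (i % 40)))) = false := by
            simp [ha]
          simp only [hne, Bool.false_eq_true, if_false, if_neg ha]
          push_cast; ring
      · have hne : (((((i % 40 : Nat) : Int), a)) == ((((k : Nat) : Int), v k))) = false := by
          simp only [beq_eq_false_iff_ne, ne_eq, Prod.mk.injEq, not_and]
          intro h
          exact absurd (Nat.cast_inj.mp h).symm hk
        simp only [hne, Bool.false_eq_true, if_false, if_neg hk]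
        push_cast; ring
    rw [List.map_congr_left (fun k _ => step k), PySem.List.sum_map_add_int, ih,
        sum_ite_range 40 (i % 40) _ (Nat.mod_lt _ (by omega))]
    ring

theorem buildCnt_eq_foldl (l : List Int) (i : Nat) (d : PySem.Dict (Int × Int) Int) :
    buildCnt l i d = (keysOf l i).foldl (fun d x => d.insert x (d.getD x 0 + 1)) d := by
  induction l generalizing i d with
  | nil => simp [buildCnt, keysOf]
  | cons a t ih => simp [buildCnt, keysOf, ih]

theorem buildCnt_getD (l : List Int) (k : Int × Int) :
    (buildCnt l 0 PySem.Dict.empty).getD k 0 = ((keysOf l 0).count k : Int) := by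
  rw [buildCnt_eq_foldl, PySem.Dict.getD_foldl_insert_add_one]
  simp [PySem.Dict.getD_empty]

theorem cntM_eq_scoreB (pat : List Int) (hdvd : pat.length ∣ 40) (l : List Int) (i : Nat) :
    cntM (fun k => pat.getD (k % pat.length) 0) l i = scoreB pat l i 0 := by
  induction l generalizing i with
  | nil => simp [cntM, scoreB]
  | cons a t ih =>
    simp only [cntM, scoreB]
    rw [scoreB_acc, ← ih]
    have h : i % 40 % pat.length = i % pat.length := Nat.mod_mod_of_dvd i hdvd
    simp only [h]
    ring

theorem scoreC_eq (l : List Int) (pat : List Int) (hdvd : pat.length ∣ 40) :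
    scoreC (buildCnt l 0 PySem.Dict.empty) pat = scoreB pat l 0 0 := by
  unfold scoreC
  rw [PySem.List.pyRange_one]
  simp only [List.map_map]
  have hmap : ∀ k : Nat, k ∈ List.range ((40 : Int) - 0).toNat →
      ((fun r => (buildCnt l 0 PySem.Dict.empty).getD
            (r, PySem.List.pyGetD pat (PySem.Int.mod r (pat.length : Int)) 0) 0)
          ∘ fun k : Nat => (0 : Int) + k) k
        = (((keysOf l 0).count ((k : Int), pat.getD (k % pat.length) 0)) : Int) := by
    intro k _
    simp only [Function.comp, zero_add]
    rw [show PySem.Int.mod (k : Int) (pat.length : Int) = ((k % pat.length : Nat) : Int) from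
          PySem.Int.mod_natCast k pat.length,
        PySem.List.pyGetD_natCast, buildCnt_getD]
  rw [List.map_congr_left hmap]
  have h40 : ((40 : Int) - 0).toNat = 40 := by decide
  rw [h40, sumCount (fun k => pat.getD (k % pat.length) 0) l 0, cntM_eq_scoreB pat hdvd]

theorem loopA_split (l : List Int) (i : Nat) (c0 c1 c2 : Int) :
    loopA l i (c0, c1, c2) =
      (c0 + scoreB [1, 2, 3, 4, 5] l i 0,
       c1 + scoreB [2, 1, 2, 3, 2, 4, 2, 5] l i 0,
       c2 + scoreB [3, 3, 1, 1, 2, 2, 4, 4, 5, 5] l i 0) := by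
  induction l generalizing i c0 c1 c2 with
  | nil => simp [loopA, scoreB]
  | cons a rest ih =>
    simp only [loopA, scoreB, List.length]
    rw [ih, scoreB_acc, scoreB_acc ([2,1,2,3,2,4,2,5]), scoreB_acc ([3,3,1,1,2,2,4,4,5,5])]
    have hsym : ∀ x a : Int, (if x = a then (1:Int) else 0) = (if a = x then 1 else 0) := by
      intro x a; by_cases h : x = a <;> simp [h, eq_comm]
    refine Prod.ext ?_ (Prod.ext ?_ ?_) <;>
      · simp only [hsym]
        conv_rhs => rw [scoreB_acc]
        ring

theorem max3_eq (x y z : Int) :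
    (PySem.List.max? [x, y, z] (fun v => v)).getD 0 = max (max x y) z := by
  simp only [PySem.List.max?, List.foldl]
  split_ifs <;> simp_all <;> split_ifs <;> simp_all <;> omega

-- ===== VERDICT (by name: the statement is the Claim_ definition above) =====
set_option maxRecDepth 4000 in
theorem solution_spec : Claim_equal_solution := by
  intro answers _
  unfold Spec_solution solution solution_alt
  have e1 := scoreC_eq answers [1, 2, 3, 4, 5] (by decide)
  have e2 := scoreC_eq answers [2, 1, 2, 3, 2, 4, 2, 5] (by decide)
  have e3 := scoreC_eq answers [3, 3, 1, 1, 2, 2, 4, 4, 5, 5] (by decide)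
  simp only [List.map, loopA_split, zero_add, e1, e2, e3, max3_eq]
  set s0 := scoreB [1, 2, 3, 4, 5] answers 0 0
  set s1 := scoreB [2, 1, 2, 3, 2, 4, 2, 5] answers 0 0
  set s2 := scoreB [3, 3, 1, 1, 2, 2, 4, 4, 5, 5] answers 0 0
  simp only [PySem.List.enumerate_cons, PySem.List.enumerate_nil, List.filter]
  simp only [← Bool.cond_decide]
  cases hd0 : decide (s0 = max (max s0 s1) s2) <;>
  cases hd1 : decide (s1 = max (max s0 s1) s2) <;>
  cases hd2 : decide (s2 = max (max s0 s1) s2) <;>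
    simp only [Bool.cond_false, Bool.cond_true, List.map] <;> norm_num
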